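-- pv_equiv track=rewrite | github.com/pypi-data/pypi-mirror-30 | packages/siapatools/siapatools-0.6.1.tar.gz/siapatools-0.6.1/siapatools/siapatools.py | calc_dv_rip
-- ===== SOURCE A (Python) =====
-- def calc_dv_rip(valor):
--     '''
--     Calcula o digito verificador do RIP
--     RETORNA: RIP com dígito (13 dígitos)
--     '''
--     if len(valor) < 13:
--         if len(valor) == 11:
--             prog = [4, 3, 2, 9, 8, 7, 6, 5, 4, 3, 2]
--         else:
--             prog = [5, 4, 3, 2, 9, 8, 7, 6, 5, 4, 3, 2]
--
--         dv = 0
--         for i in range(0, len(valor)):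
--             dv += int(valor[i]) * prog[i]
--         dv = dv % 11
--
--         if any([dv == 0, dv == 1]):
--             dv = 0
--         else:
--             dv = 11 - dv
--         return calc_dv_rip(valor + str(dv))
--     else:
--         return valor
-- ===== SOURCE B (Python) =====
-- def calc_dv_rip(valor):
--     '''
--     Calcula o digito verificador do RIP
--     RETORNA: RIP com dígito (13 dígitos)
--     '''
--     while len(valor) < 13:
--         if len(valor) == 11:
--             prog = [4, 3, 2, 9, 8, 7, 6, 5, 4, 3, 2]
--         else:
--             prog = [5, 4, 3, 2, 9, 8, 7, 6, 5, 4, 3, 2]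
--         dv = sum(int(d) * w for d, w in zip(valor, prog)) % 11
--         valor += str(0 if dv < 2 else 11 - dv)
--     return valor
-- ===== Notes on version B (the rewrite author's own statement) =====
-- stated objective: idiomatic
-- what changed: Replaces A's recursion with an iterative while-loop over the growing string and replaces the indexed for-loop over range(len) with a zip/sum of digits against the weight vector.
import Mathlib
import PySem

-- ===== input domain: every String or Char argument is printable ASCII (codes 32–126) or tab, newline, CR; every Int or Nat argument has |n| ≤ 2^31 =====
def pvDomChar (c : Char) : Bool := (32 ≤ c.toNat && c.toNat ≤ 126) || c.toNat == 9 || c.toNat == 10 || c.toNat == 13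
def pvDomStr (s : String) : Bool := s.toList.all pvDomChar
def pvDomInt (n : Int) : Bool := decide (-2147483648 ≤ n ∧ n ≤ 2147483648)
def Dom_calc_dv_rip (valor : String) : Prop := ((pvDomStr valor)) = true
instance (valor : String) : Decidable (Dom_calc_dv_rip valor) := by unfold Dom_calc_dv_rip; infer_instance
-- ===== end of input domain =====

-- B replaces A's recursion by an iterative while-loop and A's indexed for-loop over range(len) by a zip/sum; same cost, more idiomatic.

-- int(c) for one character; total here — Pre_ excludes the non-digit inputs where Python raises ValueError
def pyIntChar (c : Char) : Int := (PySem.Int.ofChars? [c]).getD 0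

-- str(dv) is nonempty for the small dv both programs compute (needed for termination)
lemma toChars_ne_nil_of_small (n : Int) (h0 : 0 ≤ n) (h9 : n ≤ 10) : PySem.Int.toChars n ≠ [] := by
  interval_cases n <;> decide

-- ===== PORT A =====
-- the dv computed by one call of A: indexed for-loop over range(len(valor)), then % 11, then the {0,1}→0 mapping
def stepA (l : List Char) : Int :=
  let prog : List Int := if l.length = 11 then [4,3,2,9,8,7,6,5,4,3,2] else [5,4,3,2,9,8,7,6,5,4,3,2]
  let dv0 : Int := (PySem.List.pyRange 0 l.length 1).foldl
      (fun acc i => acc + pyIntChar (PySem.List.pyGetD l i ' ') * PySem.List.pyGetD prog i 0) 0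
  let dv1 := PySem.Int.mod dv0 11
  if dv1 = 0 ∨ dv1 = 1 then 0 else 11 - dv1

-- the final {0,1}→0 mapping of a value mod 11 lies in [0,10], in A's phrasing and in B's
lemma finA_bounds (s : Int) :
    0 ≤ (if PySem.Int.mod s 11 = 0 ∨ PySem.Int.mod s 11 = 1 then (0:Int) else 11 - PySem.Int.mod s 11)
    ∧ (if PySem.Int.mod s 11 = 0 ∨ PySem.Int.mod s 11 = 1 then (0:Int) else 11 - PySem.Int.mod s 11) ≤ 10 := by
  have h1 := PySem.Int.mod_nonneg s (b := 11) (by omega)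
  have h2 := PySem.Int.mod_lt s (b := 11) (by omega)
  split <;> omega

lemma finB_bounds (s : Int) :
    0 ≤ (if PySem.Int.mod s 11 < 2 then (0:Int) else 11 - PySem.Int.mod s 11)
    ∧ (if PySem.Int.mod s 11 < 2 then (0:Int) else 11 - PySem.Int.mod s 11) ≤ 10 := by
  have h1 := PySem.Int.mod_nonneg s (b := 11) (by omega)
  have h2 := PySem.Int.mod_lt s (b := 11) (by omega)
  split <;> omega

lemma stepA_bounds (l : List Char) : 0 ≤ stepA l ∧ stepA l ≤ 10 := by
  simp only [stepA]
  exact finA_bounds _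

-- literal transliteration of A: recurse on valor + str(dv) until the length reaches 13
def calc_dv_rip (valor : String) : String :=
  if _h : valor.toList.length < 13 then
    calc_dv_rip (String.ofList (valor.toList ++ PySem.Int.toChars (stepA valor.toList)))
  else valor
termination_by 13 - valor.toList.length
decreasing_by
  have hb := stepA_bounds valor.toList
  have hlen : 0 < (PySem.Int.toChars (stepA valor.toList)).length :=
    List.length_pos_iff.mpr (toChars_ne_nil_of_small _ hb.1 hb.2)
  simp only [String.toList_ofList, List.length_append]
  omega

-- ===== PORT B =====
-- the dv computed by one pass of B's while-loop: zip/sum, then % 11, then dv<2 → 0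
def stepB (l : List Char) : Int :=
  let prog : List Int := if l.length = 11 then [4,3,2,9,8,7,6,5,4,3,2] else [5,4,3,2,9,8,7,6,5,4,3,2]
  let dv := PySem.Int.mod (((l.zip prog).map (fun p => pyIntChar p.1 * p.2)).sum) 11
  if dv < 2 then 0 else 11 - dv

lemma stepB_bounds (l : List Char) : 0 ≤ stepB l ∧ stepB l ≤ 10 := by
  simp only [stepB]
  exact finB_bounds _

-- transliteration of B: the while-loop as tail recursion on the same state `valor`
def calc_dv_rip_alt (valor : String) : String :=
  if _h : valor.toList.length < 13 then
    calc_dv_rip_alt (String.ofList (valor.toList ++ PySem.Int.toChars (stepB valor.toList)))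
  else valor
termination_by 13 - valor.toList.length
decreasing_by
  have hb := stepB_bounds valor.toList
  have hlen : 0 < (PySem.Int.toChars (stepB valor.toList)).length :=
    List.length_pos_iff.mpr (toChars_ne_nil_of_small _ hb.1 hb.2)
  simp only [String.toList_ofList, List.length_append]
  omega

-- ===== PRECONDITION & SPEC =====
-- Pre_ excludes exactly the inputs where Python's A raises ValueError: a string shorter
-- than 13 containing a non-digit character (int(valor[i]) fails on it).
def Pre_calc_dv_rip (valor : String) : Prop :=
  13 ≤ valor.toList.length ∨ valor.toList.all (·.isDigit) = true
instance (valor : String) : Decidable (Pre_calc_dv_rip valor) := by unfold Pre_calc_dv_rip; infer_instance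
def pvWitness_calc_dv_rip : String := "01234567890"

def Spec_calc_dv_rip (valor : String) (out : String) : Prop := out = calc_dv_rip_alt valor
instance (valor : String) (out : String) : Decidable (Spec_calc_dv_rip valor out) := by unfold Spec_calc_dv_rip; infer_instance

-- ===== CLAIM (what is proved, stated in full; the proofs are below) =====
def Claim_equal_calc_dv_rip : Prop := ∀ (valor : String), Dom_calc_dv_rip valor → Pre_calc_dv_rip valor → Spec_calc_dv_rip valor (calc_dv_rip valor)

-- ===== LEMMAS AND PROOFS =====

-- A's indexed weighted sum equals B's zip/sum whenever the weight list is long enough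
lemma idx_sum_eq_zip_sum (l : List Char) (prog : List Int) (h : l.length ≤ prog.length) :
    (PySem.List.pyRange 0 l.length 1).foldl
        (fun acc i => acc + pyIntChar (PySem.List.pyGetD l i ' ') * PySem.List.pyGetD prog i 0) 0
      = ((l.zip prog).map (fun p => pyIntChar p.1 * p.2)).sum := by
  rw [PySem.List.foldl_add, PySem.List.pyRange_zero_nat]
  simp only [List.map_map, zero_add]
  congr 1
  apply List.ext_getElem
  · simp; omega
  · intro i h1 h2
    simp only [List.getElem_map, List.getElem_range, Function.comp_apply, List.getElem_zip]
    simp only [List.length_map, List.length_range] at h1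
    rw [PySem.List.pyGetD_natCast, PySem.List.pyGetD_natCast,
        List.getD_eq_getElem l ' ' h1, List.getD_eq_getElem prog 0 (by omega)]

-- the two one-step dv's agree on every list a step is taken on
lemma stepA_eq_stepB (l : List Char) (h : l.length < 13) : stepA l = stepB l := by
  simp only [stepA, stepB]
  have hlen : l.length ≤ (if l.length = 11 then [4,3,2,9,8,7,6,5,4,3,2] else ([5,4,3,2,9,8,7,6,5,4,3,2] : List Int)).length := by
    split <;> simp <;> omega
  rw [idx_sum_eq_zip_sum l _ hlen]
  set s : Int := ((l.zip (if l.length = 11 then [4,3,2,9,8,7,6,5,4,3,2] else ([5,4,3,2,9,8,7,6,5,4,3,2] : List Int))).map (fun p => pyIntChar p.1 * p.2)).sum with hs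
  have h1 := PySem.Int.mod_nonneg s (b := 11) (by omega)
  by_cases hc : PySem.Int.mod s 11 < 2
  · rw [if_pos (by omega), if_pos hc]
  · rw [if_neg (by omega), if_neg hc]

-- identical steps make the two recursions agree everywhere
lemma calc_dv_rip_eq_alt (valor : String) : calc_dv_rip valor = calc_dv_rip_alt valor := by
  rw [calc_dv_rip, calc_dv_rip_alt]
  split
  · rename_i h
    rw [stepA_eq_stepB valor.toList h]
    exact calc_dv_rip_eq_alt _
  · rfl
termination_by 13 - valor.toList.length
decreasing_by
  have hb := stepB_bounds valor.toList
  have hlen : 0 < (PySem.Int.toChars (stepB valor.toList)).length :=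
    List.length_pos_iff.mpr (toChars_ne_nil_of_small _ hb.1 hb.2)
  simp only [String.toList_ofList, List.length_append]
  omega

-- ===== VERDICT (by name: the statement is the Claim_ definition above) =====
theorem calc_dv_rip_spec : Claim_equal_calc_dv_rip := by
  intro valor _ _
  exact calc_dv_rip_eq_alt valor
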